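-- pv_equiv track=rewrite | github.com/bhavya2403/OpeningsExplorer_public | work_with_chesscom_api.py | pgn_to_moves
-- ===== SOURCE A (Python) =====
-- def pgn_to_moves(pgn_to_game):
--     moves = []
--     last_dot = -1
--     for i in range(len(pgn_to_game)):
--         if pgn_to_game[i] == '.': last_dot = i
--         if pgn_to_game[i] == '{':
--             moves.append(pgn_to_game[last_dot+2:i-1])
--     return moves
-- ===== SOURCE B (Python) =====
-- def pgn_to_moves(pgn_to_game):
--     return [pgn_to_game[pgn_to_game.rfind('.', 0, i) + 2 : i - 1]
--             for i, c in enumerate(pgn_to_game) if c == '{']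
-- ===== Notes on version B (the rewrite author's own statement) =====
-- stated objective: idiomatic
-- what changed: Replaces the incremental last_dot state machine by a stateless comprehension over the brace positions that recomputes the preceding dot position with str.rfind on the prefix before each brace.
import Mathlib
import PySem

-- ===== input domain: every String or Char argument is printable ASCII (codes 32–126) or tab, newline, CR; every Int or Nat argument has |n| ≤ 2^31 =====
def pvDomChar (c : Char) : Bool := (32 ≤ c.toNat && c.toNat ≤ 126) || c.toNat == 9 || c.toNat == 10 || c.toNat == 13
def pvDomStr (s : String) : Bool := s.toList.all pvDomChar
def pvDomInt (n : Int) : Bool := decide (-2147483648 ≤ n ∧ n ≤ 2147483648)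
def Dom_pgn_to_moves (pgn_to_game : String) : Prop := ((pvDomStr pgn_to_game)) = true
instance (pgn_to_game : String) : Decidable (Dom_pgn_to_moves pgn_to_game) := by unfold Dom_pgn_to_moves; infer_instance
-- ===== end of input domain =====

-- B replaces A's incremental last_dot tracking by a stateless comprehension that looks the
-- preceding dot up with rfind('.', 0, i) at each '{' (idiomatic; no speed claim).

-- ===== PORT A =====
-- A: one forward loop over the indices, carrying (moves, last_dot).
def pgn_to_moves (pgn_to_game : String) : List String :=
  let cs := pgn_to_game.toList
  let st := (PySem.List.pyRange 0 (cs.length : Int) 1).foldl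
    (fun (st : List String × Int) i =>
      let last_dot := if PySem.List.pyGetD cs i ' ' = '.' then i else st.2
      let moves :=
        if PySem.List.pyGetD cs i ' ' = '{' then
          st.1 ++ [String.ofList (PySem.List.slice cs (some (last_dot + 2)) (some (i - 1)))]
        else st.1
      (moves, last_dot)) ([], -1)
  st.1

-- ===== PORT B =====
-- B: comprehension over enumerate, keeping the '{' positions, with rfind per brace.
def pgn_to_moves_alt (pgn_to_game : String) : List String :=
  let cs := pgn_to_game.toList
  ((PySem.List.enumerate cs 0).filter (fun p => p.2 == '{')).map
    (fun p =>
      String.ofList (PySem.List.slice cs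
        (some (PySem.Chars.rfindFrom cs ['.'] 0 (some p.1) + 2)) (some (p.1 - 1))))

-- ===== PRECONDITION & SPEC =====
def Spec_pgn_to_moves (pgn_to_game : String) (out : List String) : Prop := out = pgn_to_moves_alt pgn_to_game
instance (pgn_to_game : String) (out : List String) : Decidable (Spec_pgn_to_moves pgn_to_game out) := by unfold Spec_pgn_to_moves; infer_instance

-- ===== CLAIM (what is proved, stated in full; the proofs are below) =====
def Claim_equal_pgn_to_moves : Prop := ∀ (pgn_to_game : String), Dom_pgn_to_moves pgn_to_game → Spec_pgn_to_moves pgn_to_game (pgn_to_moves pgn_to_game)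

-- ===== LEMMAS AND PROOFS =====

-- the last index j < n with cs[j] = '.', as A tracks it (-1 if none)
def lastDotRec (cs : List Char) : Nat → Int
  | 0 => -1
  | n + 1 => if cs.getD n ' ' = '.' then (n : Int) else lastDotRec cs n

-- the moves accumulated by A over the first n indices
def movesAux (cs : List Char) : Nat → List String
  | 0 => []
  | n + 1 =>
    movesAux cs n ++
      (if cs.getD n ' ' = '{' then
        [String.ofList (PySem.List.slice cs (some (lastDotRec cs n + 2)) (some ((n : Int) - 1)))]
      else [])

lemma lastDotRec_take (cs : List Char) (n m : Nat) (h : m ≤ n) :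
    lastDotRec (cs.take n) m = lastDotRec cs m := by
  induction m with
  | zero => rfl
  | succ k ih =>
    have hk : k < n := h
    simp [lastDotRec, List.getD, hk, ih (Nat.le_of_lt hk)]

lemma head_prefix_char (c : Char) (m : List Char) : [c].isPrefixOf m = (m.head? == some c) := by
  cases m <;> simp [List.isPrefixOf, eq_comm]

lemma getElem?_beq_getD (cs : List Char) (j : Nat) (c : Char) (hc : c ≠ ' ') :
    (cs[j]? == some c) = decide (cs.getD j ' ' = c) := by
  rcases h : cs[j]? with _ | x
  · simp [List.getD, h, Ne.symm hc]
  · simp only [List.getD, h, Option.getD_some]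
    rfl

lemma go_eq_lastDotRec (cs : List Char) (k : Nat) :
    PySem.Chars.rfind.go cs ['.'] k = lastDotRec cs (k + 1) := by
  induction k with
  | zero =>
    have h0 : (['.'].isPrefixOf cs) = (cs[0]? == some '.') := by
      rw [head_prefix_char]; cases cs <;> simp
    rw [PySem.Chars.rfind.go, h0,
      getElem?_beq_getD cs 0 '.' (by decide)]
    simp [lastDotRec]
  | succ k ih =>
    have h0 : (['.'].isPrefixOf (cs.drop (k + 1))) = (cs[k+1]? == some '.') := by
      rw [head_prefix_char]
      cases hd : (cs.drop (k+1)) with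
      | nil =>
        have h' : (cs.drop (k+1))[0]? = cs[k+1]? := by simp
        rw [hd] at h'
        simp [← h']
      | cons a as =>
        have h' : (cs.drop (k+1))[0]? = cs[k+1]? := by simp
        rw [hd] at h'
        simp [← h']
    rw [PySem.Chars.rfind.go, h0, getElem?_beq_getD cs (k+1) '.' (by decide)]
    by_cases h : cs.getD (k+1) ' ' = '.'
    · simp only [List.getD] at h
      simp [h, lastDotRec, List.getD]
    · simp only [List.getD] at h
      simp [h, lastDotRec, List.getD, ih]

lemma rfind_take (cs : List Char) (n : Nat) (h : n ≤ cs.length) :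
    PySem.Chars.rfind (cs.take n) ['.'] = lastDotRec cs n := by
  have hlen : (cs.take n).length = n := by simp [h]
  simp only [PySem.Chars.rfind, hlen, go_eq_lastDotRec]
  have hout : (cs.take n).getD n ' ' = ' ' := by
    simp [List.getD]
  simp only [lastDotRec, hout]
  simp only [if_neg (by decide : ¬ (' ' = '.'))]
  exact lastDotRec_take cs n n le_rfl

lemma rfindFrom_eq_lastDotRec (cs : List Char) (n : Nat) (h : n ≤ cs.length) :
    PySem.Chars.rfindFrom cs ['.'] 0 (some (n : Int)) = lastDotRec cs n := by
  have h1 : ¬ ((cs.length : Int) < (n : Int)) := by exact_mod_cast Nat.not_lt.mpr h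
  have h2 : ¬ ((n : Int) < 0) := by omega
  simp only [PySem.Chars.rfindFrom, h1, if_false, h2,
    if_neg (by omega : ¬ ((0:Int) < 0)), Int.toNat_natCast, Int.toNat_zero,
    List.drop_zero]
  rw [rfind_take cs n h]
  by_cases hr : lastDotRec cs n = -1
  · simp [hr]
  · simp [hr]

-- enumerate over l ++ [x]
lemma enumerate_append_singleton {α : Type} (l : List α) (x : α) (s : Int) :
    PySem.List.enumerate (l ++ [x]) s = PySem.List.enumerate l s ++ [(s + l.length, x)] := by
  induction l generalizing s with
  | nil => simp [PySem.List.enumerate_nil, PySem.List.enumerate_cons]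
  | cons a as ih =>
    simp [PySem.List.enumerate_cons, ih, List.cons_append]
    ring_nf

-- A's fold over the first n indices
lemma foldA (cs : List Char) (n : Nat) (h : n ≤ cs.length) :
    (PySem.List.pyRange 0 (n : Int) 1).foldl
      (fun (st : List String × Int) i =>
        let last_dot := if PySem.List.pyGetD cs i ' ' = '.' then i else st.2
        let moves :=
          if PySem.List.pyGetD cs i ' ' = '{' then
            st.1 ++ [String.ofList (PySem.List.slice cs (some (last_dot + 2)) (some (i - 1)))]
          else st.1
        (moves, last_dot)) ([], -1)
    = (movesAux cs n, lastDotRec cs n) := by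
  induction n with
  | zero => simp [PySem.List.pyRange_one_eq_nil, movesAux, lastDotRec]
  | succ k ih =>
    have hk : k ≤ cs.length := Nat.le_of_succ_le h
    have hsplit : PySem.List.pyRange 0 ((k : Int) + 1) 1
        = PySem.List.pyRange 0 (k : Int) 1 ++ [(k : Int)] :=
      PySem.List.pyRange_one_succ_right (a := 0) (b := (k : Int)) (by omega)
    have hcast : ((k + 1 : Nat) : Int) = (k : Int) + 1 := by push_cast; ring
    rw [hcast, hsplit, List.foldl_append, ih hk]
    have hget : PySem.List.pyGetD cs (k : Int) ' ' = cs.getD k ' ' :=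
      PySem.List.pyGetD_natCast cs k ' '
    simp only [List.foldl_cons, List.foldl_nil, hget]
    by_cases hbrace : cs.getD k ' ' = '{'
    · have hdot : ¬ cs.getD k ' ' = '.' := by rw [hbrace]; decide
      simp only [List.getD] at hbrace hdot
      simp [hbrace, movesAux, lastDotRec, List.getD]
    · by_cases hdot : cs.getD k ' ' = '.'
      · simp only [List.getD] at hdot
        simp [hdot, movesAux, lastDotRec, List.getD]
      · simp only [List.getD] at hbrace hdot
        simp [hbrace, hdot, movesAux, lastDotRec, List.getD]

-- B's comprehension over the first n characters
lemma enumB (cs : List Char) (n : Nat) (h : n ≤ cs.length) :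
    ((PySem.List.enumerate (cs.take n) 0).filter (fun p => p.2 == '{')).map
      (fun p =>
        String.ofList (PySem.List.slice cs
          (some (PySem.Chars.rfindFrom cs ['.'] 0 (some p.1) + 2)) (some (p.1 - 1))))
    = movesAux cs n := by
  induction n with
  | zero => simp [PySem.List.enumerate_nil, movesAux]
  | succ k ih =>
    have hk : k < cs.length := h
    have htake : cs.take (k + 1) = cs.take k ++ [cs[k]] := by
      rw [List.take_add_one]; simp [List.getElem?_eq_getElem hk]
    rw [htake, enumerate_append_singleton, List.filter_append, List.map_append,
      ih (Nat.le_of_lt hk)]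
    have hlen : ((cs.take k).length : Int) = (k : Int) := by simp [Nat.le_of_lt hk]
    have hgd : cs.getD k ' ' = cs[k] := by simp [List.getD, List.getElem?_eq_getElem hk]
    have hmin : min (k : Int) (cs.length : Int) = (k : Int) := by omega
    by_cases hbrace : cs[k] = '{'
    · simp only [List.filter_cons, List.filter_nil]
      rw [movesAux]
      simp [hbrace, hmin, List.getElem?_eq_getElem hk,
        rfindFrom_eq_lastDotRec cs k (Nat.le_of_lt hk)]
    · simp only [List.filter_cons, List.filter_nil]
      rw [movesAux]
      simp [hbrace, List.getElem?_eq_getElem hk]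

-- ===== VERDICT (by name: the statement is the Claim_ definition above) =====
theorem pgn_to_moves_spec : Claim_equal_pgn_to_moves := by
  intro s _
  unfold Spec_pgn_to_moves
  show pgn_to_moves s = pgn_to_moves_alt s
  simp only [pgn_to_moves, pgn_to_moves_alt]
  rw [foldA s.toList s.toList.length le_rfl,
    ← enumB s.toList s.toList.length le_rfl, List.take_length]
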